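-- pv_equiv track=rewrite | github.com/JosueAmaral15/creator-of-mathematical-formulas | old/math-formula-creator-main3.py | binary_search_miniterm
-- ===== SOURCE A (Python) =====
-- def binary_search_miniterm(wanted, dictionary):
--     items = sorted(dictionary.items(), key=lambda x: x[1])
--     values = [v for _, v in items]
--     keys = [k for k, _ in items]
--     l, r = 0, len(values) - 1
--     while l <= r:
--         mid = (l + r) // 2
--         if values[mid] == wanted:
--             return values[mid], keys[mid]
--         elif values[mid] < wanted:
--             l = mid + 1
--         else:
--             r = mid - 1
--     idx = min(max(l, 0), len(values) - 1)
--     return values[idx], keys[idx]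
-- ===== SOURCE B (Python) =====
-- def binary_search_miniterm(wanted, dictionary):
--     items = sorted(dictionary.items(), key=lambda x: x[1])
--     for k, v in items:
--         if v == wanted:
--             return v, k
--     idx = sum(1 for _, v in items if v < wanted)
--     if idx > len(items) - 1:
--         idx = len(items) - 1
--     return items[idx][1], items[idx][0]
-- ===== Notes on version B (the rewrite author's own statement) =====
-- stated objective: simpler
-- what changed: The hand-written binary search over parallel keys/values lists is replaced by a single linear first-match scan over the sorted items plus a count of values below wanted (the insertion point) for the fallback entry.
-- outside the precondition, e.g. on binary_search_miniterm(1, {'a': 1, 'b': 1, 'c': 1}): A returns (1, 'b'), B returns (1, 'a'); on binary_search_miniterm(0, {}): A raises IndexError, B raises IndexError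
import Mathlib
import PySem

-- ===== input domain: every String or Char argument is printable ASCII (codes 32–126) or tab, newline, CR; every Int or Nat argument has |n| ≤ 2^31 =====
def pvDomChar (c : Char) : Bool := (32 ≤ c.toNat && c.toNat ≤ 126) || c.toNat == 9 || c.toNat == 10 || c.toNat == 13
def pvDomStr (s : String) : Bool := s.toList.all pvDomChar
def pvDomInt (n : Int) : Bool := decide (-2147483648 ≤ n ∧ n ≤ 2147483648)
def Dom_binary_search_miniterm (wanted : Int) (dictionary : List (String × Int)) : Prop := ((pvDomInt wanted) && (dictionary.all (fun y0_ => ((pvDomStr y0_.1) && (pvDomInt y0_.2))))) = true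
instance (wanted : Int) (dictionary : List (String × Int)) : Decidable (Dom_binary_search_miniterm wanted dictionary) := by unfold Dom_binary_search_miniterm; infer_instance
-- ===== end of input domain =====

-- B replaces the iterative binary search with a first-match scan plus an insertion-point count;
-- same sort, same fallback entry. (Equivalence is about the return value only; neither mutates.)

-- ===== PORT A =====
-- the while loop of A: returns .inl (value, key) on a hit, .inr of the final l otherwise
def pvLoopA (wanted : Int) (values : List Int) (keys : List String) (l r : Int) :
    (Int × String) ⊕ Int :=
  if h : l ≤ r then
    let mid := PySem.Int.floordiv (l + r) 2
    let v := PySem.List.pyGetD values mid 0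
    if v == wanted then .inl (v, PySem.List.pyGetD keys mid "")
    else if v < wanted then pvLoopA wanted values keys (mid + 1) r
    else pvLoopA wanted values keys l (mid - 1)
  else .inr l
termination_by (r + 1 - l).toNat
decreasing_by
  · have := PySem.Int.floordiv_two_mid_bounds h; omega
  · have := PySem.Int.floordiv_two_mid_bounds h; omega

def binary_search_miniterm (wanted : Int) (dictionary : List (String × Int)) : Int × String :=
  let items := PySem.List.sorted (PySem.Dict.ofList dictionary).items (fun x => x.2) false
  let values := items.map (fun p => p.2)
  let keys := items.map (fun p => p.1)
  match pvLoopA wanted values keys 0 ((values.length : Int) - 1) with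
  | .inl out => out
  | .inr l =>
    let idx := min (max l 0) ((values.length : Int) - 1)
    (PySem.List.pyGetD values idx 0, PySem.List.pyGetD keys idx "")

-- ===== PORT B =====
def binary_search_miniterm_alt (wanted : Int) (dictionary : List (String × Int)) : Int × String :=
  let items := PySem.List.sorted (PySem.Dict.ofList dictionary).items (fun x => x.2) false
  match items.find? (fun p => p.2 == wanted) with
  | some kv => (kv.2, kv.1)
  | none =>
    let idx0 : Int := (items.countP (fun p => decide (p.2 < wanted)) : Nat)
    let idx := if idx0 > (items.length : Int) - 1 then (items.length : Int) - 1 else idx0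
    let e := PySem.List.pyGetD items idx ("", 0)
    (e.2, e.1)

-- ===== PRECONDITION & SPEC =====
-- Pre_ excludes the empty dictionary, on which A raises IndexError, and dictionaries in which
-- the wanted value occurs more than once, where the key A returns among the tied entries is an
-- accident of the binary-search midpoint path (B returns the first tied entry in sorted order).
def Pre_binary_search_miniterm (wanted : Int) (dictionary : List (String × Int)) : Prop :=
  dictionary ≠ [] ∧ (PySem.Dict.ofList dictionary).values.count wanted ≤ 1

instance (wanted : Int) (dictionary : List (String × Int)) : Decidable (Pre_binary_search_miniterm wanted dictionary) := by
  unfold Pre_binary_search_miniterm; infer_instance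

def pvWitness_binary_search_miniterm : Int × (List (String × Int)) := (3, [("a", 3), ("b", 5)])

def Spec_binary_search_miniterm (wanted : Int) (dictionary : List (String × Int)) (out : Int × String) : Prop := out = binary_search_miniterm_alt wanted dictionary
instance (wanted : Int) (dictionary : List (String × Int)) (out : Int × String) : Decidable (Spec_binary_search_miniterm wanted dictionary out) := by unfold Spec_binary_search_miniterm; infer_instance

-- ===== CLAIM (what is proved, stated in full; the proofs are below) =====
def Claim_equal_binary_search_miniterm : Prop := ∀ (wanted : Int) (dictionary : List (String × Int)), Dom_binary_search_miniterm wanted dictionary → Pre_binary_search_miniterm wanted dictionary → Spec_binary_search_miniterm wanted dictionary (binary_search_miniterm wanted dictionary)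

-- ===== LEMMAS AND PROOFS =====

lemma countP_eq_of_index (p : Int → Bool) : ∀ (xs : List Int) (k : Nat), k ≤ xs.length →
    (∀ i (hi : i < xs.length), p xs[i] = true ↔ i < k) → xs.countP p = k := by
  intro xs
  induction xs with
  | nil => intro k hk _; simp at hk; simp [hk]
  | cons x t ih =>
    intro k hk h
    cases k with
    | zero =>
      have hx : ¬ p x = true := by
        have := h 0 (by simp); simpa using this
      have ht : t.countP p = 0 := ih 0 (by omega) (by
        intro i hi
        have := h (i + 1) (by simpa using Nat.succ_lt_succ hi)
        simpa using this)
      simp [hx, ht]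
    | succ k' =>
      have hx : p x = true := by
        have := h 0 (by simp); simpa using this
      have ht : t.countP p = k' := ih k' (by simpa using hk) (by
        intro i hi
        have := h (i + 1) (by simpa using Nat.succ_lt_succ hi)
        simpa [Nat.succ_lt_succ_iff] using this)
      simp [hx, ht]

lemma sorted_getElem_mono {xs : List Int} (hs : xs.Pairwise (· ≤ ·)) {i j : Nat}
    (hij : i ≤ j) (hj : j < xs.length) : xs[i]'(by omega) ≤ xs[j] := by
  rcases Nat.lt_or_ge i j with h | h
  · exact (List.pairwise_iff_getElem.mp hs) i j (by omega) hj h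
  · have : i = j := by omega
    subst this; exact le_refl _

lemma find?_of_unique (w : Int) : ∀ (items : List (String × Int)) (j : Nat) (hj : j < items.length),
    items[j].2 = w → (items.map (fun p => p.2)).count w ≤ 1 →
    items.find? (fun p => p.2 == w) = some items[j] := by
  intro items
  induction items with
  | nil => intro j hj; simp at hj
  | cons x t ih =>
    intro j hj hval hc
    cases j with
    | zero =>
      simp at hval
      simp [hval]
    | succ j' =>
      have hj' : j' < t.length := by simpa using hj
      have hval' : t[j'].2 = w := by simpa using hval
      have hmem : w ∈ t.map (fun p => p.2) := by
        rw [List.mem_map]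
        exact ⟨t[j'], List.getElem_mem hj', hval'⟩
      have hx : ¬ x.2 = w := by
        intro hxw
        have h1 : 1 ≤ (t.map (fun p => p.2)).count w := List.one_le_count_iff.mpr hmem
        have : ((x :: t).map (fun p => p.2)).count w = (t.map (fun p => p.2)).count w + 1 := by
          simp [hxw]
        omega
      have hc' : (t.map (fun p => p.2)).count w ≤ 1 := by
        have : ((x :: t).map (fun p => p.2)).count w = (t.map (fun p => p.2)).count w + (if x.2 = w then 1 else 0) := by
          simp [List.count_cons]
        omega
      have := ih j' hj' hval' hc'
      simp only [List.find?_cons]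
      have hxb : (x.2 == w) = false := by simpa using hx
      simp [hxb, this]

lemma loop_base (w : Int) (items : List (String × Int)) (l r : Int)
    (hlr : ¬ l ≤ r) (h0 : 0 ≤ l) (hln : l ≤ (items.length : Int))
    (h1 : ∀ i : Nat, (i : Int) < l → (hi : i < items.length) → items[i].2 < w)
    (h2 : ∀ i : Nat, r < (i : Int) → (hi : i < items.length) → w < items[i].2) :
    (match items.find? (fun p => p.2 == w) with
      | some kv => Sum.inl (kv.2, kv.1)
      | none => Sum.inr ((items.countP (fun p => decide (p.2 < w)) : Nat) : Int)) =
      (Sum.inr l : (Int × String) ⊕ Int) := by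
  have hnone : items.find? (fun p => p.2 == w) = none := by
    rw [List.find?_eq_none]
    intro p hp
    obtain ⟨i, hi, hpe⟩ := List.mem_iff_getElem.mp hp
    rcases lt_or_ge (i : Int) l with h | h
    · have := h1 i h hi; simp [← hpe]; omega
    · have := h2 i (by omega) hi; simp [← hpe]; omega
  rw [hnone]
  have hcp : items.countP (fun p => decide (p.2 < w)) = l.toNat := by
    have hmap : items.countP (fun p => decide (p.2 < w)) =
        (items.map (fun p => p.2)).countP (fun x => decide (x < w)) := by
      rw [List.countP_map]; rfl
    rw [hmap]
    apply countP_eq_of_index (fun x => decide (x < w)) _ l.toNat (by simpa using hln)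
    intro i hi
    simp only [List.getElem_map, decide_eq_true_eq]
    constructor
    · intro hless
      by_contra hge
      have := h2 i (by omega) (by simpa using hi)
      omega
    · intro hil
      exact h1 i (by omega) (by simpa using hi)
  rw [hcp]
  simp
  omega

lemma loop_correct (w : Int) (items : List (String × Int))
    (hs : (items.map (fun p => p.2)).Pairwise (· ≤ ·))
    (hc : (items.map (fun p => p.2)).count w ≤ 1) :
    ∀ (m : Nat) (l r : Int), (r + 1 - l).toNat ≤ m →
    0 ≤ l → l ≤ (items.length : Int) → r < (items.length : Int) →
    (∀ i : Nat, (i : Int) < l → (hi : i < items.length) → items[i].2 < w) →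
    (∀ i : Nat, r < (i : Int) → (hi : i < items.length) → w < items[i].2) →
    pvLoopA w (items.map (fun p => p.2)) (items.map (fun p => p.1)) l r =
      match items.find? (fun p => p.2 == w) with
      | some kv => .inl (kv.2, kv.1)
      | none => .inr ((items.countP (fun p => decide (p.2 < w)) : Nat) : Int) := by
  intro m
  induction m with
  | zero =>
    intro l r hm h0 hln hrn h1 h2
    have hlr : ¬ l ≤ r := by omega
    rw [pvLoopA, dif_neg hlr]
    exact (loop_base w items l r hlr h0 hln h1 h2).symm
  | succ m ih =>
    intro l r hm h0 hln hrn h1 h2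
    rw [pvLoopA]
    by_cases hlr : l ≤ r
    · rw [dif_pos hlr]
      have hb := PySem.Int.floordiv_two_mid_bounds hlr
      set mid := PySem.Int.floordiv (l + r) 2 with hmid
      have h0m : 0 ≤ mid := by omega
      have hjn : mid.toNat < items.length := by omega
      have hget : PySem.List.pyGetD (items.map (fun p => p.2)) mid 0 = items[mid.toNat].2 := by
        rw [PySem.List.pyGetD_eq_getElem (List.map (fun p => p.2) items) 0 h0m (by simp; omega)]
        simp
      simp only [hget]
      by_cases hv : items[mid.toNat].2 = w
      · have hbeq : (items[mid.toNat].2 == w) = true := by simpa using hv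
        simp only [hbeq, if_true]
        rw [find?_of_unique w items mid.toNat hjn hv hc]
        have hgetk : PySem.List.pyGetD (items.map (fun p => p.1)) mid "" = items[mid.toNat].1 := by
          rw [PySem.List.pyGetD_eq_getElem (List.map (fun p => p.1) items) "" h0m (by simp; omega)]
          simp
        simp [hgetk, hv]
      · have hbeq : (items[mid.toNat].2 == w) = false := by simpa using hv
        simp only [hbeq, Bool.false_eq_true, if_false]
        by_cases hlt : items[mid.toNat].2 < w
        · simp only [hlt, if_true]
          apply ih (mid + 1) r (by omega) (by omega) (by omega) hrn
          · intro i hi hin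
            have hij : i ≤ mid.toNat := by omega
            have hmono : items[i].2 ≤ items[mid.toNat].2 := by
              have := sorted_getElem_mono hs (i := i) (j := mid.toNat) hij
                (by simpa using hjn)
              simpa using this
            omega
          · exact h2
        · simp only [hlt, if_false]
          have hgt : w < items[mid.toNat].2 := by omega
          apply ih l (mid - 1) (by omega) h0 hln (by omega) h1
          intro i hi hin
          have hij : mid.toNat ≤ i := by omega
          have hmono : items[mid.toNat].2 ≤ items[i].2 := by
            have := sorted_getElem_mono hs (i := mid.toNat) (j := i) hij
              (by simpa using hin)
            simpa using this
          omega
    · rw [dif_neg hlr]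
      exact (loop_base w items l r hlr h0 hln h1 h2).symm

-- ===== VERDICT (by name: the statement is the Claim_ definition above) =====
set_option maxHeartbeats 1600000 in
theorem binary_search_miniterm_spec : Claim_equal_binary_search_miniterm := by
  intro wanted dictionary _ hpre
  obtain ⟨hne, hcount⟩ := hpre
  show binary_search_miniterm wanted dictionary = binary_search_miniterm_alt wanted dictionary
  unfold binary_search_miniterm binary_search_miniterm_alt
  dsimp only
  set items := PySem.List.sorted (PySem.Dict.ofList dictionary).items (fun x => x.2) false with hitems
  have hs : (items.map (fun p => p.2)).Pairwise (· ≤ ·) := by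
    rw [List.pairwise_map]
    exact PySem.List.sorted_pairwise (PySem.Dict.ofList dictionary).items (fun x => x.2)
  have hc : (items.map (fun p => p.2)).count wanted ≤ 1 := by
    have hperm := PySem.List.sorted_perm (PySem.Dict.ofList dictionary).items (fun x => x.2) false
    have := (hperm.map (fun p => p.2)).count_eq wanted
    rw [hitems, this]
    exact hcount
  have hmain := loop_correct wanted items hs hc
    ((((items.length : Int) - 1) + 1 - 0).toNat) 0 ((items.length : Int) - 1)
    le_rfl le_rfl (by omega) (by omega)
    (by intro i hi _; omega)
    (by intro i hi hin; omega)
  have hlen : ((items.map (fun p => p.2)).length : Int) - 1 = (items.length : Int) - 1 := by simp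
  rw [hlen, hmain]
  cases hfind : items.find? (fun p => p.2 == wanted) with
  | some kv => simp
  | none =>
    simp only []
    set c : Int := ((items.countP (fun p => decide (p.2 < wanted)) : Nat) : Int) with hcdef
    have hc0 : 0 ≤ c := by positivity
    have hmax : max c 0 = c := by omega
    have hmin : min c ((items.length : Int) - 1) =
        if c > (items.length : Int) - 1 then (items.length : Int) - 1 else c := by
      by_cases h : c > (items.length : Int) - 1 <;> simp [h] <;> omega
    rw [hmax, hmin]
    generalize (if c > (items.length : Int) - 1 then (items.length : Int) - 1 else c) = idx
    have hv : PySem.List.pyGetD (items.map (fun p => p.2)) idx 0 =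
        (PySem.List.pyGetD items idx ("", 0)).2 :=
      PySem.List.pyGetD_map (fun p => p.2) items idx ("", 0)
    have hk : PySem.List.pyGetD (items.map (fun p => p.1)) idx "" =
        (PySem.List.pyGetD items idx ("", 0)).1 :=
      PySem.List.pyGetD_map (fun p => p.1) items idx ("", 0)
    rw [hv, hk]
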